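-- pv_equiv track=rewrite | github.com/ankitmishra-IDXI0115/Python-Assignment | Ques15.py | find_longest_words
-- ===== SOURCE A (Python) =====
-- def find_longest_words(a) :
--     i=0
--     k=0
--     max_value=0
--     result = []
--     while i < len(a) :
--         j=0
--         count=0
--         while j<len(a[i]) :
--             count+=1
--             j+=1
--         result.append(count)
--         i+=1
--
--     while k < len(result) :
--         if max_value<result[k] :
--             max_value = result[k]
--
--         k+=1
--     return max_value
-- ===== SOURCE B (Python) =====
-- def find_longest_words(a):
--     max_value = 0
--     for s in a:
--         max_value = max(max_value, len(s))
--     return max_value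
-- ===== Notes on version B (the rewrite author's own statement) =====
-- stated objective: simpler
-- what changed: B drops A's materialized list of lengths, its second rescan loop, and the hand-rolled per-character counting inner loop, keeping only a running maximum via built-in len/max in one streaming pass.
import Mathlib
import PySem

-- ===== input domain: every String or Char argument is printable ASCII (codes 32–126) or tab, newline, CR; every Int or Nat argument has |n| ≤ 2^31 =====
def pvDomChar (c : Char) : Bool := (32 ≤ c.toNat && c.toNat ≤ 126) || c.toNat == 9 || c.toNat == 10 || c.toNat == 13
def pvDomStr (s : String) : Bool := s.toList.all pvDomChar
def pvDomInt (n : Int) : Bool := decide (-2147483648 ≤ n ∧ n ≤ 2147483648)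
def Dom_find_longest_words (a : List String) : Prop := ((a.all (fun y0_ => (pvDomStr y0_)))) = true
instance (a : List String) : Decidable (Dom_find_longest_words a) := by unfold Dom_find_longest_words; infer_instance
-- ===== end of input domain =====

-- B replaces A's length-table + rescan with a single running-maximum pass (simpler, O(1) extra space).

-- ===== PORT A =====
-- inner while: j,count from 0; count += 1 per character position
def pvCountA (s : String) : Int :=
  (List.range s.toList.length).foldl (fun count _ => count + 1) 0

def find_longest_words (a : List String) : Int :=
  let result : List Int := a.foldl (fun r s => r ++ [pvCountA s]) []
  result.foldl (fun max_value c => if max_value < c then c else max_value) 0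

-- ===== PORT B =====
def find_longest_words_alt (a : List String) : Int :=
  a.foldl (fun max_value s => max max_value (s.toList.length : Int)) 0

-- ===== PRECONDITION & SPEC =====
def Spec_find_longest_words (a : List String) (out : Int) : Prop := out = find_longest_words_alt a
instance (a : List String) (out : Int) : Decidable (Spec_find_longest_words a out) := by unfold Spec_find_longest_words; infer_instance

-- ===== CLAIM (what is proved, stated in full; the proofs are below) =====
def Claim_equal_find_longest_words : Prop := ∀ (a : List String), Dom_find_longest_words a → Spec_find_longest_words a (find_longest_words a)

-- ===== LEMMAS AND PROOFS =====
theorem pvCountA_eq (s : String) : pvCountA s = (s.toList.length : Int) := by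
  unfold pvCountA
  induction h : s.toList.length with
  | zero => simp
  | succ n ih =>
    have : ∀ (m : ℕ) (x : Int), (List.range m).foldl (fun count _ => count + 1) x = x + m := by
      intro m
      induction m with
      | zero => simp
      | succ k ihk => intro x; rw [List.range_succ, List.foldl_append]; simp [ihk]; omega
    simp [this]

theorem pvBuild_eq (a : List String) (init : List Int) :
    a.foldl (fun r s => r ++ [pvCountA s]) init = init ++ a.map pvCountA := by
  induction a generalizing init with
  | nil => simp
  | cons x xs ih => simp [List.foldl_cons, ih, List.append_assoc]

theorem pvStep_eq : (fun (m c : Int) => if m < c then c else m) = (fun (m c : Int) => max m c) := by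
  funext m c; simp [max_def]; split_ifs <;> omega

theorem find_longest_words_eq (a : List String) :
    find_longest_words a = find_longest_words_alt a := by
  unfold find_longest_words find_longest_words_alt
  rw [pvBuild_eq, pvStep_eq]
  simp [List.foldl_map, pvCountA_eq]

-- ===== VERDICT (by name: the statement is the Claim_ definition above) =====
theorem find_longest_words_spec : Claim_equal_find_longest_words := by
  intro a _
  unfold Spec_find_longest_words
  exact find_longest_words_eq a
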